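-- pv_equiv track=rewrite | github.com/adityadhara040505/Abusive-Language-Detection | src/trie_token_detector.py | _normalize_leetspeak
-- ===== SOURCE A (Python) =====
-- def _normalize_leetspeak(text: str) -> str:
--     """Convert common leetspeak variations"""
--     replacements = {
--         '4': 'a',
--         '3': 'e',
--         '0': 'o',
--         '1': 'i',
--         '5': 's',
--         '7': 't',
--         '8': 'b',
--         '9': 'g',
--         '@': 'a',
--         '$': 's',
--         '!': 'i',
--     }
--     result = text
--     for old, new in replacements.items():
--         result = result.replace(old, new)
--     return result
-- ===== SOURCE B (Python) =====
-- def _normalize_leetspeak(text: str) -> str: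
--     """Convert common leetspeak variations"""
--     replacements = {
--         '4': 'a',
--         '3': 'e',
--         '0': 'o',
--         '1': 'i',
--         '5': 's',
--         '7': 't',
--         '8': 'b',
--         '9': 'g',
--         '@': 'a',
--         '$': 's',
--         '!': 'i',
--     }
--     return ''.join(replacements.get(c, c) for c in text)
-- ===== Notes on version B (the rewrite author's own statement) =====
-- stated objective: idiomatic
-- what changed: B makes a single pass over the characters of text, looking each one up in the replacements dict (defaulting to itself) and joining the results, instead of A's 11 whole-string str.replace passes.
import Mathlib
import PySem

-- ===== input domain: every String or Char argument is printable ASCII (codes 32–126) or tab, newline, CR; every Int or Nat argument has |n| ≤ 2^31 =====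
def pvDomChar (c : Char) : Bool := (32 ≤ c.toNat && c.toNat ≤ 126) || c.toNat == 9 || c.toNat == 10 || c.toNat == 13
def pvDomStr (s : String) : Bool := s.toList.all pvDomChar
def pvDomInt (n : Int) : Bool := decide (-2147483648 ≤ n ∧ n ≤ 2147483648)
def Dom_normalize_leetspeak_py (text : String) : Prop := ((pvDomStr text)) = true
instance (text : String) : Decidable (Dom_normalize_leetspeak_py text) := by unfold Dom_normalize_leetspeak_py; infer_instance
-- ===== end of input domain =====

-- B replaces A's 11 whole-string replace passes by a single pass over the characters with a
-- per-character dict lookup; outputs are identical (no replacement value is also a key).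

-- ===== PORT A =====
-- the replacements dict, in insertion order (iterated by .items())
def pvRepsA : List (String × String) :=
  [("4","a"),("3","e"),("0","o"),("1","i"),("5","s"),("7","t"),("8","b"),("9","g"),("@","a"),("$","s"),("!","i")]

def normalize_leetspeak_py (text : String) : String :=
  pvRepsA.foldl (fun result p => PySem.Str.replace result p.1 p.2) text

-- ===== PORT B =====
def pvRepD : PySem.Dict Char Char :=
  PySem.Dict.ofList [('4','a'),('3','e'),('0','o'),('1','i'),('5','s'),('7','t'),('8','b'),('9','g'),('@','a'),('$','s'),('!','i')]

def normalize_leetspeak_py_alt (text : String) : String :=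
  String.ofList (text.toList.map (fun c => pvRepD.getD c c))

-- ===== PRECONDITION & SPEC =====
def Spec_normalize_leetspeak_py (text : String) (out : String) : Prop := out = normalize_leetspeak_py_alt text
instance (text : String) (out : String) : Decidable (Spec_normalize_leetspeak_py text out) := by unfold Spec_normalize_leetspeak_py; infer_instance

-- ===== CLAIM (what is proved, stated in full; the proofs are below) =====
def Claim_equal_normalize_leetspeak_py : Prop := ∀ (text : String), Dom_normalize_leetspeak_py text → Spec_normalize_leetspeak_py text (normalize_leetspeak_py text)

-- ===== LEMMAS AND PROOFS =====

-- a single-character str.replace is a character-wise map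
lemma replace_go_single (o n : Char) :
    ∀ (fuel : Nat) (l acc : List Char), l.length ≤ fuel →
      PySem.Chars.replace.go [o] [n] fuel l acc
        = acc.reverse ++ l.map (fun c => if c = o then n else c) := by
  intro fuel
  induction fuel with
  | zero =>
    intro l acc h
    have : l = [] := List.eq_nil_of_length_eq_zero (Nat.le_zero.mp h)
    subst this
    simp [PySem.Chars.replace.go]
  | succ fuel ih =>
    intro l acc h
    cases l with
    | nil => simp [PySem.Chars.replace.go]
    | cons c t =>
      by_cases hc : c = o
      · subst hc
        have hp : List.isPrefixOf [c] (c :: t) = true := by simp [List.isPrefixOf]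
        have hrec := ih t (n :: acc) (by simp at h; omega)
        simp [PySem.Chars.replace.go, hp, hrec]
      · have hp : List.isPrefixOf [o] (c :: t) = false := by
          simp [List.isPrefixOf]; exact fun h' => absurd h'.symm hc
        have hrec := ih t (c :: acc) (by simp at h; omega)
        simp [PySem.Chars.replace.go, hp, hrec, hc]

lemma replace_single (o n : Char) (cs : List Char) :
    PySem.Chars.replace cs [o] [n] = cs.map (fun c => if c = o then n else c) := by
  simp only [PySem.Chars.replace, List.isEmpty, reduceCtorEq, if_false]
  simpa using replace_go_single o n cs.length cs [] le_rfl

-- the composed per-character effect of A's 11 passes equals B's dict lookup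
lemma char_eq_lookup (c : Char) :
    (fun c => if c = '!' then 'i' else c)
      ((fun c => if c = '$' then 's' else c)
        ((fun c => if c = '@' then 'a' else c)
          ((fun c => if c = '9' then 'g' else c)
            ((fun c => if c = '8' then 'b' else c)
              ((fun c => if c = '7' then 't' else c)
                ((fun c => if c = '5' then 's' else c)
                  ((fun c => if c = '1' then 'i' else c)
                    ((fun c => if c = '0' then 'o' else c)
                      ((fun c => if c = '3' then 'e' else c)
                        ((fun c => if c = '4' then 'a' else c) c))))))))))
      = pvRepD.getD c c := by
  by_cases h1 : c = '4'; · subst h1; decide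
  by_cases h2 : c = '3'; · subst h2; decide
  by_cases h3 : c = '0'; · subst h3; decide
  by_cases h4 : c = '1'; · subst h4; decide
  by_cases h5 : c = '5'; · subst h5; decide
  by_cases h6 : c = '7'; · subst h6; decide
  by_cases h7 : c = '8'; · subst h7; decide
  by_cases h8 : c = '9'; · subst h8; decide
  by_cases h9 : c = '@'; · subst h9; decide
  by_cases h10 : c = '$'; · subst h10; decide
  by_cases h11 : c = '!'; · subst h11; decide
  rw [show pvRepD = PySem.Dict.mk [('4','a'),('3','e'),('0','o'),('1','i'),('5','s'),('7','t'),('8','b'),('9','g'),('@','a'),('$','s'),('!','i')] from by decide]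
  simp [PySem.Dict.getD, PySem.Dict.get?, beq_iff_eq,
        Ne.symm h1, Ne.symm h2, Ne.symm h3, Ne.symm h4, Ne.symm h5, Ne.symm h6,
        Ne.symm h7, Ne.symm h8, Ne.symm h9, Ne.symm h10, Ne.symm h11,
        h1, h2, h3, h4, h5, h6, h7, h8, h9, h10, h11]

-- abstract: eleven successive maps collapse into one map of the composed function
lemma map_chain (f1 f2 f3 f4 f5 f6 f7 f8 f9 f10 f11 g : Char → Char)
    (hg : ∀ c, f11 (f10 (f9 (f8 (f7 (f6 (f5 (f4 (f3 (f2 (f1 c)))))))))) = g c) :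
    ∀ cs : List Char,
      ((((((((((cs.map f1).map f2).map f3).map f4).map f5).map f6).map f7).map f8).map f9).map f10).map f11
        = cs.map g := by
  intro cs
  induction cs with
  | nil => simp only [List.map_nil]
  | cons c t ih => simp only [List.map_cons, ih, hg]

-- ===== VERDICT (by name: the statement is the Claim_ definition above) =====
theorem normalize_leetspeak_py_spec : Claim_equal_normalize_leetspeak_py := by
  intro text _
  show normalize_leetspeak_py text = normalize_leetspeak_py_alt text
  apply String.toList_inj.mp
  unfold normalize_leetspeak_py pvRepsA normalize_leetspeak_py_alt
  simp only [List.foldl, PySem.Str.toList_replace, String.toList_ofList,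
    show ("4":String).toList = ['4'] from by decide, show ("a":String).toList = ['a'] from by decide,
    show ("3":String).toList = ['3'] from by decide, show ("e":String).toList = ['e'] from by decide,
    show ("0":String).toList = ['0'] from by decide, show ("o":String).toList = ['o'] from by decide,
    show ("1":String).toList = ['1'] from by decide, show ("i":String).toList = ['i'] from by decide,
    show ("5":String).toList = ['5'] from by decide, show ("s":String).toList = ['s'] from by decide,
    show ("7":String).toList = ['7'] from by decide, show ("t":String).toList = ['t'] from by decide,
    show ("8":String).toList = ['8'] from by decide, show ("b":String).toList = ['b'] from by decide,
    show ("9":String).toList = ['9'] from by decide, show ("g":String).toList = ['g'] from by decide,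
    show ("@":String).toList = ['@'] from by decide, show ("$":String).toList = ['$'] from by decide,
    show ("!":String).toList = ['!'] from by decide,
    replace_single]
  refine map_chain _ _ _ _ _ _ _ _ _ _ _ _ (fun c => ?_) text.toList
  exact char_eq_lookup c
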